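-- pv_equiv track=rewrite | github.com/harinders9203/Incidence | soc_ready.py | _parse_sc_output
-- ===== SOURCE A (Python) =====
-- def _parse_sc_output(output):
--     """Parse sc query output"""
--     services = []
--     current_service = {}
--
--     for line in output.split('\n'):
--         line = line.strip()
--         if line.startswith('SERVICE_NAME:'):
--             if current_service:
--                 services.append(current_service)
--             current_service = {'name': line.split(':', 1)[1].strip()}
--         elif line.startswith('DISPLAY_NAME:'):
--             current_service['display_name'] = line.split(':', 1)[1].strip()
--         elif line.startswith('STATE:'):
--             state_info = line.split(':', 1)[1].strip()
--             current_service['state'] = state_info.split()[0]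
--         elif line.startswith('TYPE:'):
--             current_service['type'] = line.split(':', 1)[1].strip()
--
--     if current_service:
--         services.append(current_service)
--
--     return services
-- ===== SOURCE B (Python) =====
-- _FIELDS = (('SERVICE_NAME:', 'name'),
--            ('DISPLAY_NAME:', 'display_name'),
--            ('STATE:', 'state'),
--            ('TYPE:', 'type'))
--
--
-- def _block_to_service(block):
--     """Turn one block of stripped lines into a service dict via the prefix->key table."""
--     svc = {}
--     for line in block:
--         for prefix, key in _FIELDS:
--             if line.startswith(prefix):
--                 value = line.split(':', 1)[1].strip()
--                 svc[key] = value.split()[0] if key == 'state' else value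
--                 break
--     return svc
--
--
-- def _parse_sc_output(output):
--     """Parse sc query output (two passes: segment into blocks, then map blocks to dicts)"""
--     done = []
--     cur = []
--     for raw in output.split('\n'):
--         line = raw.strip()
--         if line.startswith('SERVICE_NAME:'):
--             done.append(cur)
--             cur = [line]
--         else:
--             cur.append(line)
--     done.append(cur)
--
--     services = []
--     for block in done:
--         svc = _block_to_service(block)
--         if svc:
--             services.append(svc)
--     return services
-- ===== Notes on version B (the rewrite author's own statement) =====
-- stated objective: alternative
-- what changed: A's single stateful loop carrying a current-service dict is replaced by two passes: first segment the stripped lines into SERVICE_NAME-delimited blocks (keeping pre-SERVICE_NAME lines as an initial block), then map each block to a service dict via a prefix-to-key table, keeping only non-empty dicts.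
-- outside the precondition, e.g. on _parse_sc_output('STATE:'): A raises IndexError, B raises IndexError
import Mathlib
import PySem

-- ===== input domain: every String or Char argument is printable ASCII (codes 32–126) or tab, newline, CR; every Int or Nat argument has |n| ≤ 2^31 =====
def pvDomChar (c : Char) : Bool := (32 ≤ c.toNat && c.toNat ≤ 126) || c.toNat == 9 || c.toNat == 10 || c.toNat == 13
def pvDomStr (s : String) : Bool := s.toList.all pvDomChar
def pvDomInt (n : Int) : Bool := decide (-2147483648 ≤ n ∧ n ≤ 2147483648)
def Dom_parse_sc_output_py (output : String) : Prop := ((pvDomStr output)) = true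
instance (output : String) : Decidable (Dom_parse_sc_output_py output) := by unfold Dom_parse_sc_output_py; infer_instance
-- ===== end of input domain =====

-- B replaces A's single stateful loop by two passes (segment into SERVICE_NAME blocks, then map
-- each block to a dict via a prefix→key table); objective: alternative decomposition, same cost.

-- ===== PORT A =====
-- line.split(':', 1)[1] — exact whenever line contains ':', which holds on every line the
-- ports apply it to (the line starts with a prefix ending in ':').
def pvAfterColon (line : String) : String :=
  ((PySem.Str.splitMax? line ":" 1).getD []).getD 1 ""

-- state_info.split()[0] — Python raises IndexError when state_info is empty; the port returns ""
-- there; Pre_ excludes exactly those inputs, on which it is exact.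
def pvFirstWord (s : String) : String := (PySem.Str.split₀ s).getD 0 ""

def pvStepA (st : List (PySem.Dict String String) × PySem.Dict String String) (raw : String) :
    List (PySem.Dict String String) × PySem.Dict String String :=
  let line := PySem.Str.strip raw
  if PySem.Str.startswith line "SERVICE_NAME:" then
    ((if st.2.items = [] then st.1 else st.1 ++ [st.2]),
      PySem.Dict.insert PySem.Dict.empty "name" (PySem.Str.strip (pvAfterColon line)))
  else if PySem.Str.startswith line "DISPLAY_NAME:" then
    (st.1, st.2.insert "display_name" (PySem.Str.strip (pvAfterColon line)))
  else if PySem.Str.startswith line "STATE:" then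
    (st.1, st.2.insert "state" (pvFirstWord (PySem.Str.strip (pvAfterColon line))))
  else if PySem.Str.startswith line "TYPE:" then
    (st.1, st.2.insert "type" (PySem.Str.strip (pvAfterColon line)))
  else st

def parse_sc_output_py (output : String) : List (List (String × String)) :=
  let fin := ((PySem.Str.split? output "\n").getD []).foldl pvStepA ([], PySem.Dict.empty)
  (if fin.2.items = [] then fin.1 else fin.1 ++ [fin.2]).map PySem.Dict.items

-- ===== PORT B =====
def pvFields : List (String × String) :=
  [("SERVICE_NAME:", "name"), ("DISPLAY_NAME:", "display_name"),
   ("STATE:", "state"), ("TYPE:", "type")]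

def pvUpdB (svc : PySem.Dict String String) (line : String) : PySem.Dict String String :=
  match pvFields.find? (fun pk => PySem.Str.startswith line pk.1) with
  | some (_, key) =>
      let value := PySem.Str.strip (pvAfterColon line)
      svc.insert key (if key == "state" then pvFirstWord value else value)
  | none => svc

def pvBlockToService (block : List String) : PySem.Dict String String :=
  block.foldl pvUpdB PySem.Dict.empty

def pvSegStep (st : List (List String) × List String) (raw : String) :
    List (List String) × List String :=
  let line := PySem.Str.strip raw
  if PySem.Str.startswith line "SERVICE_NAME:" then (st.1 ++ [st.2], [line])
  else (st.1, st.2 ++ [line])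

def parse_sc_output_py_alt (output : String) : List (List (String × String)) :=
  let p := ((PySem.Str.split? output "\n").getD []).foldl pvSegStep ([], [])
  (p.1 ++ [p.2]).foldl
    (fun acc b =>
      let svc := pvBlockToService b
      if svc.items = [] then acc else acc ++ [svc.items]) []

-- ===== PRECONDITION & SPEC =====
-- Pre_ excludes exactly the inputs on which Python A raises IndexError: a line whose strip is
-- "STATE:" (empty value after the colon, so state_info.split()[0] fails). B raises there too.
def Pre_parse_sc_output_py (output : String) : Prop :=
  ∀ raw ∈ (PySem.Str.split? output "\n").getD [], PySem.Str.strip raw ≠ "STATE:"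
instance (output : String) : Decidable (Pre_parse_sc_output_py output) := by
  unfold Pre_parse_sc_output_py; infer_instance

def pvWitness_parse_sc_output_py : String := "SERVICE_NAME: a\nSTATE: 4 RUNNING"

def Spec_parse_sc_output_py (output : String) (out : List (List (String × String))) : Prop :=
  out = parse_sc_output_py_alt output
instance (output : String) (out : List (List (String × String))) :
    Decidable (Spec_parse_sc_output_py output out) := by
  unfold Spec_parse_sc_output_py; infer_instance

-- ===== CLAIM (what is proved, stated in full; the proofs are below) =====
def Claim_equal_parse_sc_output_py : Prop :=
  ∀ (output : String), Dom_parse_sc_output_py output → Pre_parse_sc_output_py output →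
    Spec_parse_sc_output_py output (parse_sc_output_py output)

-- ===== LEMMAS AND PROOFS =====

-- A's services list equals the dicts B emits from a list of finished blocks.
def pvEmitD (bs : List (List String)) : List (PySem.Dict String String) :=
  bs.foldl (fun acc b => if (pvBlockToService b).items = [] then acc else acc ++ [pvBlockToService b]) []

lemma pvEmitD_append (bs : List (List String)) (c : List String) :
    pvEmitD (bs ++ [c]) =
      if (pvBlockToService c).items = [] then pvEmitD bs else pvEmitD bs ++ [pvBlockToService c] := by
  simp [pvEmitD]

lemma pvBlockToService_append (b : List String) (l : String) :
    pvBlockToService (b ++ [l]) = pvUpdB (pvBlockToService b) l := by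
  simp [pvBlockToService]

-- B's table dispatch equals A's elif chain, on an already-stripped non-SERVICE_NAME line.
lemma pvUpdB_eq (d : PySem.Dict String String) (l : String)
    (hs : PySem.Str.startswith l "SERVICE_NAME:" = false) :
    pvUpdB d l =
      if PySem.Str.startswith l "DISPLAY_NAME:" then
        d.insert "display_name" (PySem.Str.strip (pvAfterColon l))
      else if PySem.Str.startswith l "STATE:" then
        d.insert "state" (pvFirstWord (PySem.Str.strip (pvAfterColon l)))
      else if PySem.Str.startswith l "TYPE:" then
        d.insert "type" (PySem.Str.strip (pvAfterColon l))
      else d := by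
  by_cases h1 : PySem.Str.startswith l "DISPLAY_NAME:" <;>
    by_cases h2 : PySem.Str.startswith l "STATE:" <;>
      by_cases h3 : PySem.Str.startswith l "TYPE:" <;>
        simp only [pvUpdB, pvFields, List.find?, hs, h1, h2, h3,
          Bool.not_eq_true] at * <;> rfl

-- B's dict for a fresh SERVICE_NAME block.
lemma pvBlockToService_service (l : String)
    (hs : PySem.Str.startswith l "SERVICE_NAME:" = true) :
    pvBlockToService [l] =
      PySem.Dict.insert PySem.Dict.empty "name" (PySem.Str.strip (pvAfterColon l)) := by
  simp only [pvBlockToService, List.foldl, pvUpdB, pvFields, List.find?, hs]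
  rfl

-- Main invariant: A's fold over any tail, started from the state B would describe,
-- lands on the state B describes after segmenting that tail.
lemma pvMain (ls : List String) :
    ∀ (blocks : List (List String)) (cur : List String),
      ls.foldl pvStepA (pvEmitD blocks, pvBlockToService cur)
        = (pvEmitD (ls.foldl pvSegStep (blocks, cur)).1,
           pvBlockToService (ls.foldl pvSegStep (blocks, cur)).2) := by
  induction ls with
  | nil => intro blocks cur; simp
  | cons raw ls ih =>
    intro blocks cur
    by_cases hs : PySem.Str.startswith (PySem.Str.strip raw) "SERVICE_NAME:"
    · have hA : pvStepA (pvEmitD blocks, pvBlockToService cur) raw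
          = (pvEmitD (blocks ++ [cur]), pvBlockToService [PySem.Str.strip raw]) := by
        simp only [pvStepA, hs, if_true, pvEmitD_append, pvBlockToService_service _ hs]
      have hB : pvSegStep (blocks, cur) raw = (blocks ++ [cur], [PySem.Str.strip raw]) := by
        simp only [pvSegStep, hs, if_true]
      simp only [List.foldl_cons, hA, hB, ih]
    · have hs' : PySem.Str.startswith (PySem.Str.strip raw) "SERVICE_NAME:" = false := by
        simpa using hs
      have hA : pvStepA (pvEmitD blocks, pvBlockToService cur) raw
          = (pvEmitD blocks, pvBlockToService (cur ++ [PySem.Str.strip raw])) := by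
        rw [pvBlockToService_append, pvUpdB_eq _ _ hs']
        simp only [pvStepA, hs', Bool.false_eq_true, if_false]
        split_ifs <;> rfl
      have hB : pvSegStep (blocks, cur) raw = (blocks, cur ++ [PySem.Str.strip raw]) := by
        simp only [pvSegStep, hs', Bool.false_eq_true, if_false]
      simp only [List.foldl_cons, hA, hB, ih]

lemma pvFinal_eq (bs : List (List String)) :
    bs.foldl (fun acc b =>
        let svc := pvBlockToService b
        if svc.items = [] then acc else acc ++ [svc.items]) []
      = (pvEmitD bs).map PySem.Dict.items := by
  have h : ∀ (acc : List (PySem.Dict String String)),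
      bs.foldl (fun acc b =>
          let svc := pvBlockToService b
          if svc.items = [] then acc else acc ++ [svc.items]) (acc.map PySem.Dict.items)
        = (bs.foldl (fun acc b =>
            if (pvBlockToService b).items = [] then acc else acc ++ [pvBlockToService b]) acc).map
            PySem.Dict.items := by
    induction bs with
    | nil => intro acc; rfl
    | cons b bs ih =>
      intro acc
      simp only [List.foldl_cons]
      split_ifs with h1 <;> simp [← ih]
  simpa [pvEmitD] using h []

-- ===== VERDICT (by name: the statement is the Claim_ definition above) =====
theorem parse_sc_output_py_spec : Claim_equal_parse_sc_output_py := by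
  intro output _ _
  show parse_sc_output_py output = parse_sc_output_py_alt output
  unfold parse_sc_output_py parse_sc_output_py_alt
  have h0 : (([], PySem.Dict.empty) :
      List (PySem.Dict String String) × PySem.Dict String String)
      = (pvEmitD [], pvBlockToService []) := by rfl
  rw [h0, pvMain ((PySem.Str.split? output "\n").getD []) [] [], pvFinal_eq, pvEmitD_append]
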